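-- pv_equiv track=rewrite | github.com/pypdfium2-team/pypdfium2 | src/pypdfium2/_helpers/utilities.py | colour_as_hex
-- ===== SOURCE A (Python) =====
-- def _hex_digits(c):
--
--     hxc = hex(c)[2:]
--     if len(hxc) == 1:
--         hxc = "0" + hxc
--
--     return hxc
--
-- def colour_as_hex(r, g, b, a=255):
--     """
--     Convert a colour given as values of red, green, blue, and alpha ranging from 0 to 255 to a single integer in 32-bit ARGB format.
--
--     Returns:
--         :class:`int`, :class:`bool` – The colour integer, and a logical value that is :data:`True` if an alpha channel is needed, or :data:`False` if it is not needed.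
--     """
--
--     use_alpha = True
--     if a == 255:
--         use_alpha = False
--
--     colours = (a, r, g, b)
--     for c in colours:
--         assert 0 <= c <= 255
--
--     hxc_str = "0x"
--     for c in colours:
--         hxc_str += _hex_digits(c)
--
--     hxc_int = int(hxc_str, 0)
--
--     return hxc_int, use_alpha
-- ===== SOURCE B (Python) =====
-- def colour_as_hex(r, g, b, a=255):
--     use_alpha = (a != 255)
--     for c in (a, r, g, b):
--         assert 0 <= c <= 255
--     return (a << 24) + (r << 16) + (g << 8) + b, use_alpha
-- ===== Notes on version B (the rewrite author's own statement) =====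
-- stated objective: idiomatic
-- what changed: B packs the four channels with bit shifts and addition in one closed-form expression instead of formatting each byte as a padded hex string, concatenating, and reparsing with int(s, 0); the _hex_digits helper is dropped.
import Mathlib
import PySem

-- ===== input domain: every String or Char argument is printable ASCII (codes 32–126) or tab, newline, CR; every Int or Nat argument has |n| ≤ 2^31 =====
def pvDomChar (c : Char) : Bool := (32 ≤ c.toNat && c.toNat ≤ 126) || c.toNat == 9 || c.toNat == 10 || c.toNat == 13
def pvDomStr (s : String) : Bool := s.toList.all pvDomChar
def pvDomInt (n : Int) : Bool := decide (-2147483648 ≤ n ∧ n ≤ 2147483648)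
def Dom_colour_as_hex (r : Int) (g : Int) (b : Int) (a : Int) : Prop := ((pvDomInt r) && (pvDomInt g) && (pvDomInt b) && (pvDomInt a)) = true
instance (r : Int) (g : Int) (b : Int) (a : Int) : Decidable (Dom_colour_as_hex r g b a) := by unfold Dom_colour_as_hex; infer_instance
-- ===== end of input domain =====

-- B packs the four channels with one closed-form shift-and-add expression instead of
-- formatting each byte as padded hex, concatenating, and reparsing with int(s, 0) (idiomatic rewrite).


-- ===== PORT A =====
-- Python strings are carried as List Char (concatenation = append); exact for the
-- ASCII hex strings this code builds.

-- hex digit character table, as Python's hex() uses (lowercase)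
def pvHexDigitChar (n : Nat) : Char := (['0','1','2','3','4','5','6','7','8','9','a','b','c','d','e','f']).getD n '?'

-- hex(c)[2:] for a nonnegative c (the only values reached: the assert loop precedes)
-- structural recursion on a fuel bound (n+1 steps always suffice) so the kernel can evaluate it
def pvToHexAux : Nat → Nat → List Char
  | 0, _ => []
  | f + 1, n =>
    if n < 16 then [pvHexDigitChar n]
    else pvToHexAux f (n / 16) ++ [pvHexDigitChar (n % 16)]
def pvToHex (n : Nat) : List Char := pvToHexAux (n + 1) n

-- port of _hex_digits
def hexDigitsA (c : Int) : List Char :=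
  let hxc := pvToHex c.toNat
  if hxc.length = 1 then '0' :: hxc else hxc

-- value of a lowercase hex digit character
def pvHexVal (ch : Char) : Int :=
  if '0' ≤ ch ∧ ch ≤ '9' then (ch.toNat : Int) - ('0'.toNat : Int)
  else (ch.toNat : Int) - ('a'.toNat : Int) + 10

-- int(s, 0) for a "0x"-prefixed lowercase hex literal (the only form produced by colour_as_hex)
def pvInt0x (s : List Char) : Int :=
  (s.drop 2).foldl (fun acc ch => acc * 16 + pvHexVal ch) 0

def colour_as_hex (r : Int) (g : Int) (b : Int) (a : Int) : Int × Bool :=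
  let use_alpha := if a = 255 then false else true
  let colours := [a, r, g, b]
  -- the assert loop raises AssertionError outside 0..255; those inputs are excluded by Pre_
  let hxc_str := colours.foldl (fun s c => s ++ hexDigitsA c) ['0', 'x']
  (pvInt0x hxc_str, use_alpha)

-- ===== PORT B =====
def colour_as_hex_alt (r : Int) (g : Int) (b : Int) (a : Int) : Int × Bool :=
  let use_alpha := a != 255
  -- the assert loop raises outside 0..255, same as A; excluded by Pre_
  ((a <<< (24:Nat)) + (r <<< (16:Nat)) + (g <<< (8:Nat)) + b, use_alpha)

-- ===== PRECONDITION & SPEC =====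
-- Pre_ excludes exactly the inputs on which A's assert (and B's) raises AssertionError.
def Pre_colour_as_hex (r : Int) (g : Int) (b : Int) (a : Int) : Prop :=
  (0 ≤ r ∧ r ≤ 255) ∧ (0 ≤ g ∧ g ≤ 255) ∧ (0 ≤ b ∧ b ≤ 255) ∧ (0 ≤ a ∧ a ≤ 255)
instance (r : Int) (g : Int) (b : Int) (a : Int) : Decidable (Pre_colour_as_hex r g b a) := by unfold Pre_colour_as_hex; infer_instance
def pvWitness_colour_as_hex : Int × Int × Int × Int := (10, 20, 30, 255)

def Spec_colour_as_hex (r : Int) (g : Int) (b : Int) (a : Int) (out : Int × Bool) : Prop := out = colour_as_hex_alt r g b a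
instance (r : Int) (g : Int) (b : Int) (a : Int) (out : Int × Bool) : Decidable (Spec_colour_as_hex r g b a out) := by unfold Spec_colour_as_hex; infer_instance

-- ===== CLAIM (what is proved, stated in full; the proofs are below) =====
def Claim_equal_colour_as_hex : Prop := ∀ (r : Int) (g : Int) (b : Int) (a : Int), Dom_colour_as_hex r g b a → Pre_colour_as_hex r g b a → Spec_colour_as_hex r g b a (colour_as_hex r g b a)

-- ===== LEMMAS AND PROOFS =====

-- pulling the accumulator out of the hex-value fold
theorem pv_foldl_hex (l : List Char) (acc : Int) :
    l.foldl (fun acc ch => acc * 16 + pvHexVal ch) acc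
      = acc * 16 ^ l.length + l.foldl (fun acc ch => acc * 16 + pvHexVal ch) 0 := by
  induction l generalizing acc with
  | nil => simp
  | cons ch t ih =>
    simp only [List.foldl_cons, List.length_cons]
    rw [ih (acc * 16 + pvHexVal ch), ih (0 * 16 + pvHexVal ch)]
    ring

-- per byte: _hex_digits produces two hex digits whose parsed value is the byte
set_option maxRecDepth 8000 in
theorem pv_byte (n : Nat) (h : n < 256) :
    (hexDigitsA (n : Int)).length = 2 ∧
    (hexDigitsA (n : Int)).foldl (fun acc ch => acc * 16 + pvHexVal ch) 0 = (n : Int) := by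
  revert n
  decide

theorem pv_byte' (c : Int) (h0 : 0 ≤ c) (h1 : c ≤ 255) :
    (hexDigitsA c).length = 2 ∧
    (hexDigitsA c).foldl (fun acc ch => acc * 16 + pvHexVal ch) 0 = c := by
  have hn : ((c.toNat : Int)) = c := Int.toNat_of_nonneg h0
  have hlt : c.toNat < 256 := by omega
  have := pv_byte c.toNat hlt
  rwa [hn] at this

-- ===== VERDICT (by name: the statement is the Claim_ definition above) =====
theorem colour_as_hex_spec : Claim_equal_colour_as_hex := by
  intro r g b a _ hpre
  obtain ⟨⟨hr0, hr1⟩, ⟨hg0, hg1⟩, ⟨hb0, hb1⟩, ⟨ha0, ha1⟩⟩ := hpre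
  unfold Spec_colour_as_hex colour_as_hex colour_as_hex_alt pvInt0x
  obtain ⟨hal, hav⟩ := pv_byte' a ha0 ha1
  obtain ⟨hrl, hrv⟩ := pv_byte' r hr0 hr1
  obtain ⟨hgl, hgv⟩ := pv_byte' g hg0 hg1
  obtain ⟨hbl, hbv⟩ := pv_byte' b hb0 hb1
  simp only [List.foldl_cons, List.foldl_nil, List.append_assoc, Prod.mk.injEq]
  constructor
  · -- integer component
    have hdrop : ((['0','x'] ++ (hexDigitsA a ++ (hexDigitsA r ++ (hexDigitsA g ++ hexDigitsA b)))).drop 2)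
        = hexDigitsA a ++ (hexDigitsA r ++ (hexDigitsA g ++ hexDigitsA b)) := rfl
    rw [hdrop]
    rw [List.foldl_append, List.foldl_append, List.foldl_append]
    rw [hav]
    rw [pv_foldl_hex (hexDigitsA g) _, pv_foldl_hex (hexDigitsA b) _]
    rw [pv_foldl_hex (hexDigitsA r) _]
    rw [hrv, hgv, hbv, hrl, hgl, hbl]
    rw [Int.shiftLeft_eq, Int.shiftLeft_eq, Int.shiftLeft_eq]
    push_cast
    ring
  · -- boolean component
    by_cases h : a = 255 <;> simp [h, bne]
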